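-- pv_equiv track=rewrite | github.com/pieteromt/aoc | 2018/day04/day4b.py | max_minute
-- ===== SOURCE A (Python) =====
-- def max_minute(bars):
--     n = len(bars[0])  # 60
--     hist = [0] * n
--     for bar in bars:
--         for i in range(n):
--             if bar[i] == '#':
--                 hist[i] += 1
--     return hist.index(max(hist))
-- ===== SOURCE B (Python) =====
-- def max_minute(bars):
--     n = len(bars[0])
--     marks = sorted(i for bar in bars for i in range(n) if bar[i] == '#')
--     best_i, best_len = 0, 0
--     run_i, run_len = None, 0
--     for i in marks:
--         if i == run_i:
--             run_len += 1
--         else: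
--             run_i, run_len = i, 1
--         if run_len > best_len:
--             best_i, best_len = i, run_len
--     return best_i
-- ===== Notes on version B (the rewrite author's own statement) =====
-- stated objective: alternative
-- what changed: B flattens the marked minutes of all rows into one list, sorts it, and returns the start of the first longest run found by a single run-length scan, instead of accumulating a per-column histogram and indexing its maximum.
-- outside the precondition, e.g. on max_minute([]): A raises IndexError, B raises IndexError
import Mathlib
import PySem

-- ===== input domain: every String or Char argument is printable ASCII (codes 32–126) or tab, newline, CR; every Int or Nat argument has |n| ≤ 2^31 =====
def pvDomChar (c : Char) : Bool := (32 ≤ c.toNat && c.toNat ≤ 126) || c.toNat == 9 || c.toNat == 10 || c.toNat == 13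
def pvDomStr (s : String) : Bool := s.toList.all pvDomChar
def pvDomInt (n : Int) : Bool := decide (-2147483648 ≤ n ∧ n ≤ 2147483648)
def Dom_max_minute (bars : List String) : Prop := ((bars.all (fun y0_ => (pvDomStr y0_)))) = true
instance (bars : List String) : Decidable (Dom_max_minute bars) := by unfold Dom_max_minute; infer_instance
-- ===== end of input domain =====

-- B replaces A's per-column histogram accumulation by flatten-the-marks, sort,
-- and a single run-length scan returning the start of the first longest run
-- (alternative algorithm; same results on Pre_).

-- ===== PORT A =====
def max_minute (bars : List String) : Int :=
  let n := (bars.headD "").toList.length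
  let hist : List Int := List.replicate n 0
  let hist := bars.foldl (fun h bar =>
    (PySem.List.pyRange 0 (n : Int) 1).foldl (fun h i =>
      if PySem.List.pyGetD bar.toList i ' ' = '#'
      then PySem.List.pySetD h i (PySem.List.pyGetD h i 0 + 1)
      else h) h) hist
  ((PySem.List.index? hist ((PySem.List.max? hist (fun x => x)).getD 0)).getD 0 : Int)

-- ===== PORT B =====
-- loop body of Source B's run-length scan (state = (best_i, best_len, run_i, run_len))
def bStep (s : Int × Int × Option Int × Int) (i : Int) : Int × Int × Option Int × Int :=
  let rp : Option Int × Int := if some i = s.2.2.1 then (s.2.2.1, s.2.2.2 + 1) else (some i, 1)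
  if rp.2 > s.2.1 then (i, rp.2, rp.1, rp.2) else (s.1, s.2.1, rp.1, rp.2)

def max_minute_alt (bars : List String) : Int :=
  let n := (bars.headD "").toList.length
  let marks := PySem.List.sorted
    (bars.flatMap (fun bar =>
      (PySem.List.pyRange 0 (n : Int) 1).filter
        (fun i => PySem.List.pyGetD bar.toList i ' ' = '#')))
    (fun x => x) false
  (marks.foldl bStep (0, 0, none, 0)).1

-- ===== PRECONDITION & SPEC =====
-- Pre_ excludes exactly the inputs on which Python A raises: empty bars (IndexError),
-- an empty first row (ValueError from max([])), and a row shorter than the first (IndexError).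
def Pre_max_minute (bars : List String) : Prop :=
  bars ≠ [] ∧ 0 < (bars.headD "").toList.length ∧
    ∀ bar ∈ bars, (bars.headD "").toList.length ≤ bar.toList.length
instance (bars : List String) : Decidable (Pre_max_minute bars) := by
  unfold Pre_max_minute; infer_instance
def pvWitness_max_minute : List String := (["#.", ".#"])

def Spec_max_minute (bars : List String) (out : Int) : Prop := out = max_minute_alt bars
instance (bars : List String) (out : Int) : Decidable (Spec_max_minute bars out) := by
  unfold Spec_max_minute; infer_instance

-- ===== CLAIM (what is proved, stated in full; the proofs are below) =====
def Claim_equal_max_minute : Prop := ∀ (bars : List String), Dom_max_minute bars → Pre_max_minute bars → Spec_max_minute bars (max_minute bars)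


-- ===== LEMMAS AND PROOFS =====

-- Inner loop of A over one row: each index j < m gets +1 iff p j holds.
theorem pv_inner_fold (p : Nat → Prop) [DecidablePred p] :
    ∀ (m : Nat) (h : List Int), m ≤ h.length →
      (((List.range m).foldl (fun h j => if p j then h.set j ((h[j]?).getD 0 + 1) else h) h).length
          = h.length) ∧
      (∀ k : Nat,
        (((List.range m).foldl (fun h j => if p j then h.set j ((h[j]?).getD 0 + 1) else h) h)[k]?).getD 0
          = (h[k]?).getD 0 + (if k < m ∧ p k then 1 else 0)) := by
  intro m
  induction m with
  | zero => intro h _; simp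
  | succ m ih =>
    intro h hm
    have hm' : m ≤ h.length := by omega
    obtain ⟨hlen, hget⟩ := ih h hm'
    rw [List.range_succ, List.foldl_append, List.foldl_cons, List.foldl_nil]
    by_cases hp : p m
    · rw [if_pos hp]
      constructor
      · rw [List.length_set, hlen]
      · intro k
        by_cases hk : k = m
        · rw [hk, List.getElem?_set_self (by omega), Option.getD_some, hget m]
          have h1 : ¬(m < m ∧ p m) := by rintro ⟨h1, _⟩; omega
          have h2 : m < m + 1 ∧ p m := ⟨by omega, hp⟩
          rw [if_neg h1, if_pos h2]
          ring
        · rw [List.getElem?_set_ne (by omega), hget k]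
          by_cases hpk : p k
          · have : (k < m ∧ p k) ↔ (k < m + 1 ∧ p k) := by
              constructor
              · rintro ⟨h1, h2⟩; exact ⟨by omega, h2⟩
              · rintro ⟨h1, h2⟩; exact ⟨by omega, h2⟩
            rw [if_congr this rfl rfl]
          · rw [if_neg (by rintro ⟨_, h2⟩; exact hpk h2),
              if_neg (by rintro ⟨_, h2⟩; exact hpk h2)]
    · rw [if_neg hp]
      refine ⟨hlen, fun k => ?_⟩
      rw [hget k]
      have : (k < m ∧ p k) ↔ (k < m + 1 ∧ p k) := by
        constructor
        · rintro ⟨h1, h2⟩; exact ⟨by omega, h2⟩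
        · rintro ⟨h1, h2⟩
          rcases Nat.lt_succ_iff_lt_or_eq.mp h1 with hlt | heq
          · exact ⟨hlt, h2⟩
          · subst heq; exact absurd h2 hp
      rw [if_congr this rfl rfl]

-- Outer loop of A over all rows: index k < n accumulates the per-column sum.
theorem pv_outer_fold (c : String → Nat → Prop) [∀ b, DecidablePred (c b)] (n : Nat) :
    ∀ (bars : List String) (h : List Int), n ≤ h.length →
      ((bars.foldl (fun h bar =>
          (List.range n).foldl (fun h j => if c bar j then h.set j ((h[j]?).getD 0 + 1) else h) h)
          h).length = h.length) ∧
      (∀ k : Nat, k < n →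
        ((bars.foldl (fun h bar =>
          (List.range n).foldl (fun h j => if c bar j then h.set j ((h[j]?).getD 0 + 1) else h) h)
          h)[k]?).getD 0
          = (h[k]?).getD 0 + (bars.map (fun bar => if c bar k then (1 : Int) else 0)).sum) := by
  intro bars
  induction bars with
  | nil => intro h _; simp
  | cons bar bars ih =>
    intro h hn
    rw [List.foldl_cons]
    obtain ⟨hlen1, hget1⟩ := pv_inner_fold (c bar) n h hn
    obtain ⟨hlen2, hget2⟩ := ih
      ((List.range n).foldl (fun h j => if c bar j then h.set j ((h[j]?).getD 0 + 1) else h) h)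
      (by rw [hlen1]; exact hn)
    refine ⟨by rw [hlen2, hlen1], fun k hk => ?_⟩
    rw [hget2 k hk, hget1 k, List.map_cons, List.sum_cons]
    have : (k < n ∧ c bar k) ↔ c bar k := ⟨fun x => x.2, fun x => ⟨hk, x⟩⟩
    rw [if_congr this rfl rfl]
    ring

-- Invariant of B's run-length scan over the sorted mark list: after processing the
-- prefix P, run_i/run_len track the count of the largest value seen so far, and
-- (best_i, best_len) is the least value of maximal multiplicity in P.
def pvInv (P : List Int) (s : Int × Int × Option Int × Int) : Prop :=
  (P = [] ∧ s = (0, 0, none, 0)) ∨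
  (∃ lv, lv ∈ P ∧ s.2.2.1 = some lv ∧ (∀ v ∈ P, v ≤ lv) ∧
    s.2.2.2 = (P.count lv : Int) ∧
    1 ≤ s.2.1 ∧ (P.count s.1 : Int) = s.2.1 ∧
    (∀ v : Int, (P.count v : Int) ≤ s.2.1) ∧
    (∀ v : Int, v < s.1 → (P.count v : Int) < s.2.1))

theorem pvInv_step (P : List Int) (s : Int × Int × Option Int × Int) (x : Int)
    (hI : pvInv P s) (hx : ∀ v ∈ P, v ≤ x) : pvInv (P ++ [x]) (bStep s x) := by
  rcases hI with ⟨hP, hs⟩ | ⟨lv, hmem, hri, hub, hrl, hbl1, hbi, hle, hlt⟩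
  · subst hP hs
    right
    refine ⟨x, by simp, ?_⟩
    have hstep : bStep (0, 0, none, 0) x = (x, 1, some x, 1) := by simp [bStep]
    rw [hstep]
    refine ⟨rfl, by simp, by simp, le_refl _, by simp, ?_, ?_⟩
    · intro v
      by_cases h : v = x
      · simp [List.count_cons, h]
      · simp [List.count_cons, Ne.symm h]
    · intro v hv
      simp [List.count_cons, Ne.symm (ne_of_lt hv)]
  · have hcnt : ∀ v : Int, (P ++ [x]).count v = P.count v + (if v = x then 1 else 0) := by
      intro v
      rcases eq_or_ne v x with h | h
      · subst h; simp [List.count_append]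
      · simp [List.count_append, List.count_cons, h, Ne.symm h]
    have hbimem : s.1 ∈ P := by
      have hc : 0 < List.count s.1 P := by omega
      exact List.count_pos_iff.mp hc
    by_cases hxlv : x = lv
    · -- x continues the current run
      subst hxlv
      have hstep : bStep s x =
          (if s.2.2.2 + 1 > s.2.1 then (x, s.2.2.2 + 1, s.2.2.1, s.2.2.2 + 1)
           else (s.1, s.2.1, s.2.2.1, s.2.2.2 + 1)) := by
        simp [bStep, hri]
      right
      by_cases hgt : s.2.2.2 + 1 > s.2.1
      · refine ⟨x, by simp, ?_⟩
        rw [hstep, if_pos hgt]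
        dsimp only
        refine ⟨hri, ?_, ?_, ?_, ?_, ?_, ?_⟩
        · intro v hv
          rcases List.mem_append.mp hv with hv | hv
          · exact hub v hv
          · simp_all
        · simp only [hcnt x, if_pos rfl]; push_cast; omega
        · omega
        · simp only [hcnt x, if_pos rfl]; push_cast; omega
        · intro v
          rcases eq_or_ne v x with h | h
          · subst h; simp only [hcnt v, if_pos rfl]; push_cast; omega
          · have := hle v
            simp only [hcnt v, if_neg h]
            push_cast
            omega
        · intro v hv
          have h : v ≠ x := ne_of_lt hv
          have := hle v
          simp only [hcnt v, if_neg h]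
          push_cast
          omega
      · refine ⟨x, by simp, ?_⟩
        rw [hstep, if_neg hgt]
        dsimp only
        have hbix : s.1 ≠ x := by
          intro h
          rw [← h] at hrl
          rw [hbi] at hrl
          omega
        refine ⟨hri, ?_, ?_, ?_, ?_, ?_, ?_⟩
        · intro v hv
          rcases List.mem_append.mp hv with hv | hv
          · exact hub v hv
          · simp_all
        · simp only [hcnt x, if_pos rfl]; push_cast; omega
        · exact hbl1
        · simp only [hcnt s.1, if_neg hbix]; push_cast; omega
        · intro v
          rcases eq_or_ne v x with h | h
          · subst h; simp only [hcnt v, if_pos rfl]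
            push_cast
            omega
          · have := hle v
            simp only [hcnt v, if_neg h]
            push_cast
            omega
        · intro v hv
          have hvx : v ≠ x := by
            have h1 : s.1 ≤ x := hx s.1 hbimem
            intro h; subst h; omega
          have := hlt v hv
          simp only [hcnt v, if_neg hvx]
          push_cast
          omega
    · -- x starts a new run; x ∉ P since x bounds P from above and x ≠ lv
      have hxP : x ∉ P := by
        intro hmemx
        exact hxlv (le_antisymm (hub x hmemx) (le_trans (hx lv hmem) (le_refl x)))
      have hcx : P.count x = 0 := List.count_eq_zero_of_not_mem hxP
      have hstep : bStep s x =
          (if (1 : Int) > s.2.1 then (x, 1, some x, 1) else (s.1, s.2.1, some x, 1)) := by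
        have : some x ≠ s.2.2.1 := by rw [hri]; simp [hxlv]
        simp [bStep, this]
      have hngt : ¬((1 : Int) > s.2.1) := by omega
      right
      refine ⟨x, by simp, ?_⟩
      rw [hstep, if_neg hngt]
      dsimp only
      have hbix : s.1 ≠ x := fun h => hxP (h ▸ hbimem)
      refine ⟨rfl, ?_, ?_, ?_, ?_, ?_, ?_⟩
      · intro v hv
        rcases List.mem_append.mp hv with hv | hv
        · exact le_trans (hub v hv) (hx lv hmem)
        · simp_all
      · simp [hcnt x, hcx]
      · exact hbl1
      · simp only [hcnt s.1, if_neg hbix]; push_cast; omega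
      · intro v
        rcases eq_or_ne v x with h | h
        · subst h; simp only [hcnt v, if_pos rfl, hcx]; push_cast; omega
        · have := hle v
          simp only [hcnt v, if_neg h]
          push_cast
          omega
      · intro v hv
        have hvx : v ≠ x := by
          have h1 : s.1 ≤ x := le_trans (hub s.1 hbimem) (hx lv hmem)
          intro h; subst h; omega
        have := hlt v hv
        simp only [hcnt v, if_neg hvx]
        push_cast
        omega

theorem pvInv_fold : ∀ (xs P : List Int) (s : Int × Int × Option Int × Int),
    pvInv P s → (∀ v ∈ P, ∀ w ∈ xs, v ≤ w) → xs.Pairwise (· ≤ ·) →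
    pvInv (P ++ xs) (xs.foldl bStep s) := by
  intro xs
  induction xs with
  | nil => intro P s hI _ _; simpa using hI
  | cons x xs ih =>
    intro P s hI hcross hpw
    have hx : ∀ v ∈ P, v ≤ x := fun v hv => hcross v hv x (by simp)
    have h1 := pvInv_step P s x hI hx
    have h2 := ih (P ++ [x]) (bStep s x) h1 ?_ (List.Pairwise.of_cons hpw)
    · simpa using h2
    · intro v hv w hw
      rcases List.mem_append.mp hv with hv | hv
      · exact hcross v hv w (by simp [hw])
      · simp only [List.mem_singleton] at hv
        subst hv
        exact (List.pairwise_cons.mp hpw).1 w hw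

theorem pv_count_flatMap {α : Type} (f : α → List Int) (l : List α) (v : Int) :
    (l.flatMap f).count v = (l.map (fun a => (f a).count v)).sum := by
  induction l with
  | nil => simp
  | cons a l ih => simp [List.count_append, ih]

theorem pv_cast_sum (l : List Nat) : ((l.sum : Nat) : Int) = (l.map (fun (x : Nat) => (x : Int))).sum := by
  induction l with
  | nil => simp
  | cons a l ih => simp [ih]

theorem pv_count_bar (q : Nat → Bool) (n k : Nat) :
    ((((List.range n).filter q).map (fun (j : Nat) => (j : Int))).count ((k : Nat) : Int))
      = if k < n ∧ q k then 1 else 0 := by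
  rw [List.count_map_of_injective _ _ Nat.cast_injective k]
  by_cases h : k < n ∧ q k
  · rw [if_pos h]
    exact List.count_eq_one_of_mem ((List.nodup_range).filter q)
      (List.mem_filter.mpr ⟨List.mem_range.mpr h.1, h.2⟩)
  · rw [if_neg h]
    refine List.count_eq_zero_of_not_mem (fun hm => ?_)
    rcases List.mem_filter.mp hm with ⟨h1, h2⟩
    exact h ⟨List.mem_range.mp h1, h2⟩

theorem max_minute_spec : Claim_equal_max_minute := by
  intro bars _ hpre
  obtain ⟨hbne, hn0, hlong⟩ := hpre
  unfold Spec_max_minute max_minute max_minute_alt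
  simp only [PySem.List.pyRange_zero_natCast, List.foldl_map, List.filter_map, List.map_map,
    Function.comp_def, PySem.List.pyGetD_natCast, PySem.List.pySetD_natCast,
    List.getD_eq_getElem?_getD]
  set n := (bars.headD "").toList.length with hn
  set c : String → Nat → Prop := fun bar k => (bar.toList[k]?).getD ' ' = '#' with hc
  set mr : List Int := bars.flatMap (fun bar =>
    ((List.range n).filter (fun k => decide (c bar k))).map (fun (k : Nat) => (k : Int))) with hmr
  set marks : List Int := PySem.List.sorted mr (fun x => x) false with hmarks
  obtain ⟨hlen, hget⟩ := pv_outer_fold c n bars (List.replicate n (0 : Int)) (by simp)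
  set hist : List Int := bars.foldl (fun h bar =>
    (List.range n).foldl
      (fun h j => if c bar j then h.set j ((h[j]?).getD 0 + 1) else h) h)
    (List.replicate n (0 : Int)) with hhistdef
  have hlenn : hist.length = n := by rw [hlen]; simp
  -- hist entry k equals the multiplicity of k among the flattened marks
  have hhist : ∀ k : Nat, k < n → (hist[k]?).getD 0 = (mr.count ((k : Nat) : Int) : Int) := by
    intro k hk
    rw [hget k hk, hmr, pv_count_flatMap]
    simp only [pv_count_bar, List.getElem?_replicate, if_pos hk, Option.getD_some, zero_add]
    rw [pv_cast_sum, List.map_map]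
    refine congrArg List.sum (List.map_congr_left (fun bar _ => ?_))
    by_cases h : c bar k
    · simp [Function.comp_def, h, hk]
    · simp [Function.comp_def, h]
  have hmem_mr : ∀ v : Int, v ∈ mr → ∃ k : Nat, k < n ∧ v = (k : Int) := by
    intro v hv
    rw [hmr] at hv
    rcases List.mem_flatMap.mp hv with ⟨bar, _, hv⟩
    rcases List.mem_map.mp hv with ⟨k, hk, rfl⟩
    exact ⟨k, List.mem_range.mp (List.mem_filter.mp hk).1, rfl⟩
  have hcnteq : ∀ v : Int, marks.count v = mr.count v := by
    intro v
    exact (PySem.List.sorted_perm mr (fun x => x) false).count_eq v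
  have hpw : marks.Pairwise (· ≤ ·) := PySem.List.sorted_pairwise mr (fun x => x)
  have hinv : pvInv marks (marks.foldl bStep (0, 0, none, 0)) := by
    have := pvInv_fold marks [] (0, 0, none, 0) (Or.inl ⟨rfl, rfl⟩) (by simp) hpw
    simpa using this
  set r := marks.foldl bStep (0, 0, none, 0) with hr
  -- A's max(hist) exists since hist is nonempty
  have hne : hist ≠ [] := by
    intro h
    rw [h] at hlenn
    simp at hlenn
    omega
  obtain ⟨m, hmax⟩ : ∃ m, PySem.List.max? hist (fun x => x) = some m := by
    cases h : PySem.List.max? hist (fun x => x) with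
    | none => exact absurd ((PySem.List.max?_eq_none_iff _ _).mp h) hne
    | some m => exact ⟨m, rfl⟩
  have hmmem : m ∈ hist := PySem.List.max?_mem hmax
  have hmtop : ∀ y ∈ hist, y ≤ m := fun y hy => PySem.List.max?_isMax hmax y hy
  obtain ⟨j, hidx⟩ : ∃ j, PySem.List.index? hist m = some j := by
    have := PySem.List.index?_isSome_iff (xs := hist) (v := m)
    rcases h : PySem.List.index? hist m with _ | j
    · rw [h] at this; simp at this; exact absurd hmmem this
    · exact ⟨j, rfl⟩
  obtain ⟨hjlt, hjval, hjmin⟩ := PySem.List.getElem_of_index?_eq_some hidx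
  rw [hmax, Option.getD_some, hidx, Option.getD_some]
  rcases hinv with ⟨hml, hs0⟩ | ⟨lv, hlvmem, _, _, _, hbl1, hbi, hle, hlt⟩
  · -- no '#' anywhere: histogram is all zeros, both sides return 0
    have hmrnil : mr = [] := (PySem.List.sorted_eq_nil_iff _ _ _).mp hml
    have hzero : ∀ k : Nat, k < n → (hist[k]?).getD 0 = 0 := by
      intro k hk
      rw [hhist k hk, hmrnil]
      simp
    have hval : ∀ k : Nat, (h : k < hist.length) → hist[k] = 0 := by
      intro k hk
      have := hzero k (by omega)
      rwa [List.getElem?_eq_getElem hk, Option.getD_some] at this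
    have hm0 : m = 0 := by
      rcases List.mem_iff_getElem.mp hmmem with ⟨k, hk, hkv⟩
      rw [← hkv]; exact hval k hk
    have hj0 : j = 0 := by
      by_contra h
      have h0 : (0 : Nat) < j := by omega
      have h0l : (0 : Nat) < hist.length := by omega
      exact hjmin 0 h0 (by rw [hval 0 h0l, hm0])
    rw [hs0, hj0]
    simp
  · -- some '#': best_i is the least minute of maximal multiplicity, and so is index(max)
    -- r.1 is a column index k_B < n
    have hr1mem : r.1 ∈ mr := by
      have : 0 < marks.count r.1 := by omega
      rw [hcnteq r.1] at this
      exact List.count_pos_iff.mp this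
    obtain ⟨kB, hkBlt, hkBv⟩ := hmem_mr r.1 hr1mem
    have hhistkB : (hist[kB]?).getD 0 = r.2.1 := by
      rw [hhist kB hkBlt, ← hkBv, ← hcnteq r.1, hbi]
    -- the maximum of hist equals best_len
    have hmle : m ≤ r.2.1 := by
      rcases List.mem_iff_getElem.mp hmmem with ⟨k0, hk0, hk0v⟩
      have h1 : (hist[k0]?).getD 0 = (mr.count ((k0 : Nat) : Int) : Int) :=
        hhist k0 (by omega)
      rw [List.getElem?_eq_getElem hk0, Option.getD_some, hk0v] at h1
      have := hle ((k0 : Nat) : Int)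
      rw [hcnteq] at this
      omega
    have hmge : r.2.1 ≤ m := by
      have hkBl : kB < hist.length := by omega
      have := hmtop hist[kB] (List.getElem_mem hkBl)
      rw [List.getElem?_eq_getElem hkBl, Option.getD_some] at hhistkB
      omega
    have hmeq : m = r.2.1 := le_antisymm hmle hmge
    -- the first index of m in hist is kB
    have hjn : j < n := by omega
    have hjval' : (mr.count ((j : Nat) : Int) : Int) = m := by
      have := hhist j hjn
      rw [List.getElem?_eq_getElem hjlt, Option.getD_some, hjval] at this
      omega
    have hnotlt : ¬((j : Int) < r.1) := by
      intro h
      have := hlt ((j : Nat) : Int) h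
      rw [hcnteq] at this
      omega
    have hnotgt : ¬(kB < j) := by
      intro h
      have hkBl : kB < hist.length := by omega
      refine hjmin kB h ?_
      rw [List.getElem?_eq_getElem hkBl, Option.getD_some] at hhistkB
      omega
    have : j = kB := by
      rw [hkBv] at hnotlt
      omega
    rw [this, ← hkBv]
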